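-- pv_equiv track=rewrite | github.com/yangt8/31 | lab7/lab7.py | list_of_words
-- ===== SOURCE A (Python) =====
-- def list_of_words(l:list)->list:
--     'return a list of individual words with all white space and punctuation removed'
--     l2=[]
--     import string
--     for w in l:
--         punct_string = '*.,?!:;"'
--         remove_punct_table = str.maketrans(punct_string, len(punct_string) * ' ')
--         nopunct = w.translate(remove_punct_table)
--         p=nopunct.split()
--         l2.extend(p)
--     return l2
-- ===== SOURCE B (Python) =====
-- def list_of_words(l: list) -> list:
--     'return a list of individual words with all white space and punctuation removed'
--     seps = set('*.,?!:;"')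
--     out = []
--     for w in l:
--         cur = []
--         for ch in w:
--             if ch in seps or ch.isspace():
--                 if cur:
--                     out.append(''.join(cur))
--                     cur = []
--             else:
--                 cur.append(ch)
--         if cur:
--             out.append(''.join(cur))
--     return out
-- ===== Notes on version B (the rewrite author's own statement) =====
-- stated objective: faster
-- what changed: Replaces the per-word translate-punctuation-to-spaces-then-split strategy (which rebuilds a maketrans table for every word) with a single character scan that accumulates maximal runs of non-separator characters directly.
import Mathlib
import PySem

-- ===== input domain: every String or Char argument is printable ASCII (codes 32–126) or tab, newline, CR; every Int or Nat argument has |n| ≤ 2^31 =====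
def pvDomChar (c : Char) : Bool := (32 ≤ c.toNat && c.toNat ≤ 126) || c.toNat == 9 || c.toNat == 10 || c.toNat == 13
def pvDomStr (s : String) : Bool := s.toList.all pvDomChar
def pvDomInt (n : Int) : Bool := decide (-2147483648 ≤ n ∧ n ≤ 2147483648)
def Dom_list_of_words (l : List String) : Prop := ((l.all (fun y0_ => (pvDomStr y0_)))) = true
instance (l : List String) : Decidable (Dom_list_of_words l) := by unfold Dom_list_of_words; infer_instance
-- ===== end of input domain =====

-- B replaces A's per-word translate-to-spaces-then-split with a single direct scan
-- accumulating maximal runs of non-separator characters (objective: simpler).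


-- ===== PORT A =====
-- punct_string = '*.,?!:;"'
def punctA : List Char := ['*', '.', ',', '?', '!', ':', ';', '"']

-- w.translate(remove_punct_table): each punctuation char becomes a space
def translateA (c : Char) : Char := if c ∈ punctA then ' ' else c

def list_of_words (l : List String) : List String :=
  l.foldl (fun l2 w =>
    let nopunct := String.ofList (w.toList.map translateA)
    l2 ++ PySem.Str.split₀ nopunct) []

-- ===== PORT B =====
-- ch in seps or ch.isspace()
def isSepB (c : Char) : Bool := c ∈ (['*', '.', ',', '?', '!', ':', ';', '"'] : List Char) || PySem.Chars.isspace c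

-- inner character loop of B: cur accumulated reversed, flushed on separators and at the end
def scanB (cs : List Char) (cur : List Char) (out : List String) : List String :=
  match cs with
  | [] => if cur.isEmpty then out else out ++ [String.ofList cur.reverse]
  | c :: rest =>
    if isSepB c then
      if cur.isEmpty then scanB rest [] out
      else scanB rest [] (out ++ [String.ofList cur.reverse])
    else scanB rest (c :: cur) out

def list_of_words_alt (l : List String) : List String :=
  l.foldl (fun out w => scanB w.toList [] out) []

-- ===== PRECONDITION & SPEC =====
def Spec_list_of_words (l : List String) (out : List String) : Prop := out = list_of_words_alt l
instance (l : List String) (out : List String) : Decidable (Spec_list_of_words l out) := by unfold Spec_list_of_words; infer_instance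

-- ===== CLAIM (what is proved, stated in full; the proofs are below) =====
def Claim_equal_list_of_words : Prop := ∀ (l : List String), Dom_list_of_words l → Spec_list_of_words l (list_of_words l)

-- ===== LEMMAS AND PROOFS =====

-- a char is a separator for B iff its translate under A is whitespace
theorem isSep_iff (c : Char) : isSepB c = PySem.Chars.isspace (translateA c) := by
  by_cases h : c ∈ punctA
  · fin_cases h <;> decide
  · simp [isSepB, translateA, h, show (['*', '.', ',', '?', '!', ':', ';', '"'] : List Char) = punctA from rfl]

theorem translate_of_not_sep (c : Char) (h : isSepB c = false) : translateA c = c := by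
  simp [isSepB] at h
  simp [translateA, punctA, h.1]

-- B's scan equals A's translate-then-split, with accumulators related
theorem scan_eq_go (cs : List Char) : ∀ (cur : List Char) (acc : List (List Char)) (out : List String),
    scanB cs cur (out ++ (acc.reverse).map String.ofList)
      = out ++ (PySem.Chars.split₀.go (cs.map translateA) cur acc).map String.ofList := by
  induction cs with
  | nil =>
    intro cur acc out
    simp [scanB, PySem.Chars.split₀.go]
    split_ifs <;> simp
  | cons c rest ih =>
    intro cur acc out
    by_cases hs : isSepB c = true
    · have hw : PySem.Chars.isspace (translateA c) = true := by rw [← isSep_iff]; exact hs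
      by_cases hc : cur.isEmpty
      · simpa [scanB, PySem.Chars.split₀.go, hs, hw, hc] using ih [] acc out
      · have := ih [] (cur.reverse :: acc) out
        simp at this
        simpa [scanB, PySem.Chars.split₀.go, hs, hw, hc] using this
    · have hs' : isSepB c = false := by simpa using hs
      have hw : PySem.Chars.isspace (translateA c) = false := by rw [← isSep_iff]; exact hs'
      have ht := translate_of_not_sep c hs'
      have hw' : PySem.Chars.isspace c = false := ht ▸ hw
      simpa [scanB, PySem.Chars.split₀.go, hs', hw', ht] using ih (c :: cur) acc out

theorem scan_word (w : String) (out : List String) :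
    scanB w.toList [] out = out ++ PySem.Str.split₀ (String.ofList (w.toList.map translateA)) := by
  have h := scan_eq_go w.toList [] [] out
  simp only [List.reverse_nil, List.map_nil, List.append_nil] at h
  rw [h, PySem.Str.split₀]
  simp [PySem.Chars.split₀]

-- ===== VERDICT (by name: the statement is the Claim_ definition above) =====
theorem list_of_words_spec : Claim_equal_list_of_words := by
  intro l _
  unfold Spec_list_of_words list_of_words list_of_words_alt
  simp only [scan_word]
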